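-- pv_equiv track=rewrite | github.com/guoweifeng216/python | python_design/pythonprogram_design/Ch6/6-2-E23.py | calculateHighCardPointCount
-- ===== SOURCE A (Python) =====
-- def calculateHighCardPointCount(bridgeHand):
--     countDict = {'A':4, 'K':3, 'Q':2, 'J':1}
--     HPC = 0
--     for card in bridgeHand:
--         rank = card[0]  # Each card is a string of
--                         # two characters.
--         if rank in "AKQJ":
--             HPC += countDict[rank]
--     return HPC
-- ===== SOURCE B (Python) =====
-- from collections import Counter
--
-- def calculateHighCardPointCount(bridgeHand):
--     counts = Counter(card[0] for card in bridgeHand)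
--     return (4 * counts.get('A', 0) + 3 * counts.get('K', 0)
--             + 2 * counts.get('Q', 0) + 1 * counts.get('J', 0))
-- ===== Notes on version B (the rewrite author's own statement) =====
-- stated objective: alternative
-- what changed: Replaces the per-card accumulate loop (branch and dict lookup per card) by building a frequency table of leading ranks once and returning a single fixed four-term weighted sum over the honor ranks.
import Mathlib
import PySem

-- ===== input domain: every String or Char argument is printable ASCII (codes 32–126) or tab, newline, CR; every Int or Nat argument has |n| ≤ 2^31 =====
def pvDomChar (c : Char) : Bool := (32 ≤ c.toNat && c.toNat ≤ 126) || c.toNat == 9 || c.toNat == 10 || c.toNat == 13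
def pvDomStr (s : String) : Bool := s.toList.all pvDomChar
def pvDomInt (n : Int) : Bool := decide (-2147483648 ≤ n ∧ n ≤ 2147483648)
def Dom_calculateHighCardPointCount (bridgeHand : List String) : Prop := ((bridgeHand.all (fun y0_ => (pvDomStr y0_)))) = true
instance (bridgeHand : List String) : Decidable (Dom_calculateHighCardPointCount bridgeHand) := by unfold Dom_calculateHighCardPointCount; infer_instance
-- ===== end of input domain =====

-- ===== PORT A =====
-- B builds a Counter of leading ranks then takes a fixed four-term weighted sum; A accumulates per card.
-- Pre_ excludes hands containing an empty card string, on which both programs raise IndexError.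
def pvCountDict : PySem.Dict Char Int := PySem.Dict.ofList [('A', 4), ('K', 3), ('Q', 2), ('J', 1)]

def pvALoop : Int → List String → Int
  | hpc, [] => hpc
  | hpc, card :: rest =>
    match PySem.Str.pyGet? card 0 with
    | none => hpc  -- Python raises IndexError here; excluded by Pre_
    | some rank =>
        pvALoop (if PySem.Chars.isIn [rank] "AKQJ".toList then hpc + pvCountDict.getD rank 0 else hpc) rest

def calculateHighCardPointCount (bridgeHand : List String) : Int := pvALoop 0 bridgeHand

-- ===== PORT B =====
def calculateHighCardPointCount_alt (bridgeHand : List String) : Int :=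
  let counts := PySem.Dict.counter (bridgeHand.map (fun card => (PySem.Str.pyGet? card 0).getD ' '))
  4 * counts.getD 'A' 0 + 3 * counts.getD 'K' 0 + 2 * counts.getD 'Q' 0 + 1 * counts.getD 'J' 0

-- ===== PRECONDITION & SPEC =====
-- Pre_ excludes hands containing an empty card string: there both A and B raise IndexError.
def Pre_calculateHighCardPointCount (bridgeHand : List String) : Prop :=
  ∀ card ∈ bridgeHand, card.toList ≠ []
instance (bridgeHand : List String) : Decidable (Pre_calculateHighCardPointCount bridgeHand) := by
  unfold Pre_calculateHighCardPointCount; infer_instance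
def pvWitness_calculateHighCardPointCount : List String := ["AS", "KH", "7D", "JC"]

def Spec_calculateHighCardPointCount (bridgeHand : List String) (out : Int) : Prop := out = calculateHighCardPointCount_alt bridgeHand
instance (bridgeHand : List String) (out : Int) : Decidable (Spec_calculateHighCardPointCount bridgeHand out) := by unfold Spec_calculateHighCardPointCount; infer_instance

-- ===== CLAIM (what is proved, stated in full; the proofs are below) =====
def Claim_equal_calculateHighCardPointCount : Prop := ∀ (bridgeHand : List String), Dom_calculateHighCardPointCount bridgeHand → Pre_calculateHighCardPointCount bridgeHand → Spec_calculateHighCardPointCount bridgeHand (calculateHighCardPointCount bridgeHand)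

-- ===== LEMMAS AND PROOFS =====
def pvScore (l : List Char) : Int :=
  4 * l.count 'A' + 3 * l.count 'K' + 2 * l.count 'Q' + 1 * l.count 'J'

theorem pvALoop_score (cards : List String) :
    ∀ hpc : Int, (∀ c ∈ cards, c.toList ≠ []) →
      pvALoop hpc cards = hpc + pvScore (cards.map (fun c => (PySem.Str.pyGet? c 0).getD ' ')) := by
  induction cards with
  | nil => intro hpc _; simp [pvALoop, pvScore]
  | cons card rest ih =>
    intro hpc h
    have hne : card.toList ≠ [] := h card (by simp)
    obtain ⟨r, t, hct⟩ : ∃ r t, card.toList = r :: t := by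
      cases hcl : card.toList with
      | nil => exact absurd hcl hne
      | cons a b => exact ⟨a, b, rfl⟩
    have hget : PySem.Str.pyGet? card 0 = some r := by
      simp [hct]
    simp only [pvALoop, hget, List.map_cons, Option.getD_some]
    rw [ih _ (fun c hc => h c (by simp [hc]))]
    by_cases hmem : r ∈ ['A', 'K', 'Q', 'J']
    · have hin : PySem.Chars.isIn [r] "AKQJ".toList = true := by
        fin_cases hmem <;> decide
      have hcd : pvCountDict.getD r 0 =
          (if r = 'A' then (4:Int) else if r = 'K' then 3 else if r = 'Q' then 2 else 1) := by
        fin_cases hmem <;> decide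
      simp only [hin, if_true, hcd, pvScore, List.count_cons]
      fin_cases hmem <;> simp <;> ring
    · have hin : PySem.Chars.isIn [r] "AKQJ".toList = false := by
        rw [PySem.Chars.isIn_eq_false_iff]
        intro hinf
        have : r ∈ "AKQJ".toList := hinf.mem (by simp)
        simp at this
        rcases this with h1|h1|h1|h1 <;> (subst h1; simp at hmem)
      simp only [show "AKQJ".toList = ['A', 'K', 'Q', 'J'] by decide] at hin
      have hA : r ≠ 'A' := fun e => hmem (by simp [e])
      have hK : r ≠ 'K' := fun e => hmem (by simp [e])
      have hQ : r ≠ 'Q' := fun e => hmem (by simp [e])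
      have hJ : r ≠ 'J' := fun e => hmem (by simp [e])
      simp [hin, pvScore, hA, hK, hQ, hJ]

-- ===== VERDICT (by name: the statement is the Claim_ definition above) =====
theorem calculateHighCardPointCount_spec : Claim_equal_calculateHighCardPointCount := by
  intro bridgeHand _ hpre
  unfold Spec_calculateHighCardPointCount calculateHighCardPointCount calculateHighCardPointCount_alt
  rw [pvALoop_score bridgeHand 0 hpre]
  simp [PySem.Dict.getD_counter, pvScore]
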